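-- pv_equiv track=rewrite | github.com/rheeger/spark-stacker | packages/spark-app/tests/_utils/cli/reporting/comparison_reporter.py | _generate_timeframe_variants
-- ===== SOURCE A (Python) =====
-- from typing import Any, Dict, List, Optional, Tuple, Union
--
-- def _generate_timeframe_variants(current_timeframe: str) -> List[str]:
--     """Generate timeframe variants for sensitivity analysis."""
--     all_timeframes = ["15m", "30m", "1h", "2h", "4h", "8h", "12h", "1d"]
--
--     try:
--         current_index = all_timeframes.index(current_timeframe)
--     except ValueError:
--         current_index = 2  # Default to 1h if current timeframe not found
--
--     # Generate variants around current timeframe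
--     variants = []
--     for i in range(max(0, current_index - 2), min(len(all_timeframes), current_index + 3)):
--         if i != current_index:
--             variants.append(all_timeframes[i])
--
--     return variants
-- ===== SOURCE B (Python) =====
-- # Precomputed lookup table: each timeframe maps directly to its neighbor list;
-- # unknown timeframes fall back to the "1h" entry (A's default index 2).
-- _VARIANTS = {
--     "15m": ["30m", "1h"],
--     "30m": ["15m", "1h", "2h"],
--     "1h":  ["15m", "30m", "2h", "4h"],
--     "2h":  ["30m", "1h", "4h", "8h"],
--     "4h":  ["1h", "2h", "8h", "12h"],
--     "8h":  ["2h", "4h", "12h", "1d"],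
--     "12h": ["4h", "8h", "1d"],
--     "1d":  ["8h", "12h"],
-- }
--
-- def _generate_timeframe_variants(current_timeframe: str):
--     """Generate timeframe variants for sensitivity analysis."""
--     return list(_VARIANTS.get(current_timeframe, _VARIANTS["1h"]))
-- ===== Notes on version B (the rewrite author's own statement) =====
-- stated objective: alternative
-- what changed: Replaces the runtime index search plus clamped range/filter loop by a precomputed dictionary mapping each timeframe directly to its variant list, with the '1h' entry as the default for unknown timeframes.
import Mathlib
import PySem

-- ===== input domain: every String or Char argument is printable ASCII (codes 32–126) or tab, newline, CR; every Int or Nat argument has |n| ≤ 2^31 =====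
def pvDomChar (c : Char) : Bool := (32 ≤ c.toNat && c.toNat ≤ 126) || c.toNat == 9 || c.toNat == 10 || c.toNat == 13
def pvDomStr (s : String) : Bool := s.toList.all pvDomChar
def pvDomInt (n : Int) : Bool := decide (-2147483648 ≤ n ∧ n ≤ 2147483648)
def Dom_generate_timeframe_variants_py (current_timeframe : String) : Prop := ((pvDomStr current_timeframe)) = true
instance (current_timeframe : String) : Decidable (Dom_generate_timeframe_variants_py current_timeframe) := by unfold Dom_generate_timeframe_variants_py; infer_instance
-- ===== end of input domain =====

-- B replaces A's index search and filtered range loop by a precomputed timeframe→variants dictionary (alternative decomposition, same O(1) cost).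


-- ===== PORT A =====
-- literal port of A: try/except index → match on index?, default 2; loop over range(max(0,i-2), min(8,i+3)) appending all[i] when i ≠ current_index
def generate_timeframe_variants_py (current_timeframe : String) : List String :=
  let all_timeframes : List String := ["15m", "30m", "1h", "2h", "4h", "8h", "12h", "1d"]
  let current_index : Int :=
    match PySem.List.index? all_timeframes current_timeframe with
    | some k => (k : Int)
    | none => 2
  (PySem.List.pyRange (max 0 (current_index - 2)) (min (all_timeframes.length : Int) (current_index + 3)) 1).foldl
    (fun variants i =>
      if i ≠ current_index then variants ++ [PySem.List.pyGetD all_timeframes i ""] else variants)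
    []

-- ===== PORT B =====
-- the module-level precomputed table of Source B
def pvVariantsTable : PySem.Dict String (List String) :=
  PySem.Dict.ofList
    [ ("15m", ["30m", "1h"])
    , ("30m", ["15m", "1h", "2h"])
    , ("1h",  ["15m", "30m", "2h", "4h"])
    , ("2h",  ["30m", "1h", "4h", "8h"])
    , ("4h",  ["1h", "2h", "8h", "12h"])
    , ("8h",  ["2h", "4h", "12h", "1d"])
    , ("12h", ["4h", "8h", "1d"])
    , ("1d",  ["8h", "12h"]) ]

def generate_timeframe_variants_py_alt (current_timeframe : String) : List String :=
  PySem.Dict.getD pvVariantsTable current_timeframe (PySem.Dict.getD pvVariantsTable "1h" [])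

-- ===== PRECONDITION & SPEC =====
def Spec_generate_timeframe_variants_py (current_timeframe : String) (out : List String) : Prop := out = generate_timeframe_variants_py_alt current_timeframe
instance (current_timeframe : String) (out : List String) : Decidable (Spec_generate_timeframe_variants_py current_timeframe out) := by unfold Spec_generate_timeframe_variants_py; infer_instance

-- ===== CLAIM (what is proved, stated in full; the proofs are below) =====
def Claim_equal_generate_timeframe_variants_py : Prop := ∀ (current_timeframe : String), Dom_generate_timeframe_variants_py current_timeframe → Spec_generate_timeframe_variants_py current_timeframe (generate_timeframe_variants_py current_timeframe)

-- ===== LEMMAS AND PROOFS =====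
theorem gtv_of_not_mem (s : String)
    (hidx : PySem.List.index? (["15m", "30m", "1h", "2h", "4h", "8h", "12h", "1d"] : List String) s = none)
    (hget : PySem.Dict.get? pvVariantsTable s = none) :
    generate_timeframe_variants_py s = generate_timeframe_variants_py_alt s := by
  unfold generate_timeframe_variants_py generate_timeframe_variants_py_alt
  simp only [hidx, PySem.Dict.getD, hget]
  decide

theorem gtv_table_get_none (s : String)
    (h : s ∉ (["15m", "30m", "1h", "2h", "4h", "8h", "12h", "1d"] : List String)) :
    PySem.Dict.get? pvVariantsTable s = none := by
  simp only [List.mem_cons, List.not_mem_nil, or_false, not_or] at h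
  obtain ⟨h1, h2, h3, h4, h5, h6, h7, h8⟩ := h
  have hmk : pvVariantsTable = PySem.Dict.mk
      [ ("15m", ["30m", "1h"]), ("30m", ["15m", "1h", "2h"]), ("1h", ["15m", "30m", "2h", "4h"]),
        ("2h", ["30m", "1h", "4h", "8h"]), ("4h", ["1h", "2h", "8h", "12h"]),
        ("8h", ["2h", "4h", "12h", "1d"]), ("12h", ["4h", "8h", "1d"]), ("1d", ["8h", "12h"]) ] := by
    decide
  simp [hmk, PySem.Dict.get?, beq_iff_eq, Ne.symm h1, Ne.symm h2, Ne.symm h3, Ne.symm h4,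
    Ne.symm h5, Ne.symm h6, Ne.symm h7, Ne.symm h8]

-- ===== VERDICT (by name: the statement is the Claim_ definition above) =====
theorem generate_timeframe_variants_py_spec : Claim_equal_generate_timeframe_variants_py := by
  intro s _
  unfold Spec_generate_timeframe_variants_py
  by_cases hm : s ∈ (["15m", "30m", "1h", "2h", "4h", "8h", "12h", "1d"] : List String)
  · fin_cases hm <;> rfl
  · exact gtv_of_not_mem s ((PySem.List.index?_eq_none_iff _ _).mpr hm) (gtv_table_get_none s hm)
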